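-- pv_equiv track=rewrite | github.com/khuushichand/aiml-project | tldw_Server_API/app/core/File_Artifacts/file_artifacts_service.py | _count_html_escape_chars
-- ===== SOURCE A (Python) =====
-- def _count_html_escape_chars(text: str) -> int:
--     extras = {
--         "&": 4,   # & -> &amp;
--         "<": 3,   # < -> &lt;
--         ">": 3,   # > -> &gt;
--         "\"": 5,  # " -> &quot;
--         "'": 4,   # ' -> &#x27;
--     }
--     return sum(text.count(ch) * extra for ch, extra in extras.items())
-- ===== SOURCE B (Python) =====
-- def _count_html_escape_chars(text: str) -> int:
--     extras = {
--         "&": 4,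
--         "<": 3,
--         ">": 3,
--         "\"": 5,
--         "'": 4,
--     }
--     return sum(extras.get(ch, 0) for ch in text)
-- ===== Notes on version B (the rewrite author's own statement) =====
-- stated objective: idiomatic
-- what changed: Replaces five full-string str.count scans (one per special character) with a single pass over the characters summing per-character dict lookups.
import Mathlib
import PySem

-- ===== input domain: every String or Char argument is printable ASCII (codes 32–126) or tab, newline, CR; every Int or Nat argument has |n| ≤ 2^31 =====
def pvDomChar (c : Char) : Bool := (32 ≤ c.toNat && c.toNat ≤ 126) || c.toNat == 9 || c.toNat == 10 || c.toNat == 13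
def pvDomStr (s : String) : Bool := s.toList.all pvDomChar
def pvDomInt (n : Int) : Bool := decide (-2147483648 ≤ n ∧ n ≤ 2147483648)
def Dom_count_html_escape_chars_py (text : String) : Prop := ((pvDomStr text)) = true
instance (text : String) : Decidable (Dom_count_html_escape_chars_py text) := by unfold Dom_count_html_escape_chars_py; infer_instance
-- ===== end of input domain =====

-- B replaces A's five full-string count passes by one pass over the characters summing dict lookups (same results; objective: idiomatic).

-- ===== PORT A =====
def count_html_escape_chars_py (text : String) : Int :=
  let extras : PySem.Dict String Int :=
    ((((PySem.Dict.empty.insert "&" 4).insert "<" 3).insert ">" 3).insert "\"" 5).insert "'" 4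
  (extras.items).foldl (fun acc p => acc + (PySem.Str.count text p.1 : Int) * p.2) 0

-- ===== PORT B =====
-- B iterates once over text; the dict's single-character string keys are ported as Char keys
-- (Python's iteration yields the 1-char strings those keys are).
def count_html_escape_chars_py_alt (text : String) : Int :=
  let extras : PySem.Dict Char Int :=
    ((((PySem.Dict.empty.insert '&' 4).insert '<' 3).insert '>' 3).insert '"' 5).insert '\'' 4
  text.toList.foldl (fun acc c => acc + extras.getD c 0) 0

-- ===== PRECONDITION & SPEC =====
def Spec_count_html_escape_chars_py (text : String) (out : Int) : Prop := out = count_html_escape_chars_py_alt text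
instance (text : String) (out : Int) : Decidable (Spec_count_html_escape_chars_py text out) := by unfold Spec_count_html_escape_chars_py; infer_instance

-- ===== CLAIM (what is proved, stated in full; the proofs are below) =====
def Claim_equal_count_html_escape_chars_py : Prop := ∀ (text : String), Dom_count_html_escape_chars_py text → Spec_count_html_escape_chars_py text (count_html_escape_chars_py text)

-- ===== LEMMAS AND PROOFS =====

-- PySem.Chars.count.go on a single-character needle counts exactly the occurrences of that character.
theorem pv_go_single (c : Char) : ∀ (fuel : Nat) (s : List Char) (acc : Nat), s.length ≤ fuel →
    PySem.Chars.count.go [c] fuel s acc = acc + s.count c := by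
  intro fuel
  induction fuel with
  | zero => intro s acc h; cases s with
    | nil => simp [PySem.Chars.count.go]
    | cons x t => simp at h
  | succ n ih => intro s acc h; cases s with
    | nil => simp [PySem.Chars.count.go]
    | cons x t =>
      simp only [PySem.Chars.count.go]
      by_cases hx : x = c
      · subst hx
        simp [List.isPrefixOf, ih t (acc+1) (by simpa using h)]
        omega
      · have : ¬ (List.isPrefixOf [c] (x :: t) = true) := by
          simp [List.isPrefixOf]; intro hc; exact hx hc.symm
        simp [this, hx, ih t acc (by simpa using h)]

theorem pv_strcount_single (s : String) (c : Char) (h : (String.singleton c).toList = [c]) :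
    PySem.Str.count s (String.singleton c) = s.toList.count c := by
  rw [PySem.Str.count_eq, h, PySem.Chars.count]
  simpa using pv_go_single c s.toList.length s.toList 0 (Nat.le_refl _)

-- the concrete Char-keyed dict of port B, looked up pointwise
theorem pv_getD_char (c : Char) :
    (((((PySem.Dict.empty.insert '&' (4:Int)).insert '<' 3).insert '>' 3).insert '"' 5).insert '\'' 4).getD c 0
      = (if c = '&' then 4 else if c = '<' then 3 else if c = '>' then 3 else if c = '"' then 5 else if c = '\'' then 4 else 0) := by
  simp [PySem.Dict.getD_insert]
  split_ifs <;> simp_all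

-- B's single pass equals the weighted character counts.
theorem pv_foldB (l : List Char) : ∀ (a : Int),
    l.foldl (fun acc c => acc + (((((PySem.Dict.empty.insert '&' (4:Int)).insert '<' 3).insert '>' 3).insert '"' 5).insert '\'' 4).getD c 0) a
      = a + (l.count '&' : Int) * 4 + (l.count '<' : Int) * 3 + (l.count '>' : Int) * 3 + (l.count '"' : Int) * 5 + (l.count '\'' : Int) * 4 := by
  induction l with
  | nil => intro a; simp
  | cons c t ih =>
    intro a
    rw [List.foldl_cons, ih, pv_getD_char]
    simp only [List.count_cons]
    by_cases h1 : c = '&' <;> by_cases h2 : c = '<' <;> by_cases h3 : c = '>' <;>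
      by_cases h4 : c = '"' <;> by_cases h5 : c = '\'' <;>
      simp only [h1, h2, h3, h4, h5, beq_iff_eq, if_pos] <;> simp_all <;> try ring

-- ===== VERDICT (by name: the statement is the Claim_ definition above) =====
theorem count_html_escape_chars_py_spec : Claim_equal_count_html_escape_chars_py := by
  intro text _
  unfold Spec_count_html_escape_chars_py count_html_escape_chars_py count_html_escape_chars_py_alt
  have hitems : (((((PySem.Dict.empty.insert "&" (4:Int)).insert "<" 3).insert ">" 3).insert "\"" 5).insert "'" 4).items
      = [("&", (4:Int)), ("<", 3), (">", 3), ("\"", 5), ("'", 4)] := by decide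
  simp only [hitems, List.foldl_cons, List.foldl_nil]
  rw [show ("&" : String) = String.singleton '&' from rfl,
      show ("<" : String) = String.singleton '<' from rfl,
      show (">" : String) = String.singleton '>' from rfl,
      show ("\"" : String) = String.singleton '"' from rfl,
      show ("'" : String) = String.singleton '\'' from rfl]
  rw [pv_strcount_single text '&' rfl, pv_strcount_single text '<' rfl,
      pv_strcount_single text '>' rfl, pv_strcount_single text '"' rfl,
      pv_strcount_single text '\'' rfl]
  rw [pv_foldB text.toList 0]
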